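-- pv_equiv track=rewrite | github.com/tradenewsrepos/backend | newsfeedner/utils/trade_funcs.py | get_api_relation_countries
-- ===== SOURCE A (Python) =====
-- from collections import defaultdict, OrderedDict
-- from typing import List, AnyStr, Tuple, Dict, Set
--
-- def get_api_relation_countries(
--     query: Dict,
-- ) -> Dict[AnyStr, List[AnyStr]]:
--     """
--     Возвращает словрь вида {отношение_1:
--                                 {
--                                 регион_1:
--                                     [страна_1, страна_2],
--                                 регион_2:
--                                     [страна_3, страна_4]
--                                 }
--                             отношение_2:
--                                 {
--                                 регион_1:
--                                     [страна_1, страна_2],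
--                                 регион_2:
--                                     [страна_3, страна_4]
--                                 }
--                             }
--     """
--     relation_countries = defaultdict()
--     for relation, regions_dict in sorted(query.items()):
--         relation_countries[relation] = {}
--
--         for region, country_dict in sorted(regions_dict.items()):
--             countries = country_dict.keys()
--             relation_countries[relation][region] = countries
--
--     # sort regions and countries
--     for relation, region_dict in relation_countries.items():
--         sorted_region_dict = sorted(region_dict.items())
--         relation_countries[relation] = OrderedDict(sorted_region_dict)
--
--         for region, countries in sorted_region_dict:
--             relation_countries[relation][region] = sorted(countries)
--     return relation_countries
-- ===== SOURCE B (Python) =====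
-- from collections import defaultdict, OrderedDict
--
-- def get_api_relation_countries(query):
--     relation_countries = defaultdict()
--     for relation, regions_dict in sorted(query.items()):
--         inner = OrderedDict()
--         for region, country_dict in sorted(regions_dict.items()):
--             inner[region] = sorted(country_dict)
--         relation_countries[relation] = inner
--     return relation_countries
-- ===== Notes on version B (the rewrite author's own statement) =====
-- stated objective: simpler
-- what changed: B builds the nested result in one traversal, filling each inner OrderedDict directly with region -> sorted(country keys), instead of A's two-stage build-then-resort pass that first stores unsorted key views and then re-sorts and overwrites every entry.
import Mathlib
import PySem

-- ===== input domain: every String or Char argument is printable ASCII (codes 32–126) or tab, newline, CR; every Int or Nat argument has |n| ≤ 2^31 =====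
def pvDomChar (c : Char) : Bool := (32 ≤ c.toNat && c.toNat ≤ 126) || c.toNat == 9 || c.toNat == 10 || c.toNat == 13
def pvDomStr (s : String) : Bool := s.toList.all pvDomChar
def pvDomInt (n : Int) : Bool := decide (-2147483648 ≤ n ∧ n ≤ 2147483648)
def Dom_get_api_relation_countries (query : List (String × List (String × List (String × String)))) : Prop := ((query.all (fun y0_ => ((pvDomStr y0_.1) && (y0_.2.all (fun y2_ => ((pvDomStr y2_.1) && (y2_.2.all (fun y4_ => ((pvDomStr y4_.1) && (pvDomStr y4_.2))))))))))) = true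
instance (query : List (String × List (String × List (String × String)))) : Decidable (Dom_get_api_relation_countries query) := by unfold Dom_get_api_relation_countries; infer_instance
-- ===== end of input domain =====

-- B replaces A's build-then-resort two-stage construction by a single traversal that computes
-- each sorted region list and sorted country list exactly once (objective: simpler).

-- ===== PORT A =====
-- Transliteration of A: stage 1 builds relation -> {region -> country_dict.keys()} over sorted
-- items; stage 2 re-iterates the dict, replacing each value by OrderedDict(sorted items) and then
-- overwriting each region entry with the sorted country list, mutating the dict in place.
def get_api_relation_countries (query : List (String × List (String × List (String × String)))) : List (String × List (String × List String)) :=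
  let rc0 : PySem.Dict String (PySem.Dict String (List String)) := PySem.Dict.empty
  let rc1 := (PySem.List.sorted (PySem.Dict.ofList query).items (fun p => p.1)).foldl
    (fun rc p =>
      let rc := rc.insert p.1 PySem.Dict.empty
      (PySem.List.sorted (PySem.Dict.ofList p.2).items (fun q => q.1)).foldl
        (fun rc q =>
          let countries := (PySem.Dict.ofList q.2).keys
          rc.insert p.1 ((rc.getD p.1 PySem.Dict.empty).insert q.1 countries)) rc) rc0
  let rc2 := rc1.items.foldl
    (fun rc p =>
      let srd := PySem.List.sorted p.2.items (fun q => q.1)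
      let rc := rc.insert p.1 (PySem.Dict.ofList srd)
      srd.foldl
        (fun rc q =>
          rc.insert p.1 ((rc.getD p.1 PySem.Dict.empty).insert q.1 (PySem.List.sorted q.2 (fun c => c)))) rc) rc1
  rc2.items.map (fun p => (p.1, p.2.items))

-- ===== PORT B =====
-- Transliteration of B: one pass, each inner OrderedDict built directly with its final values.
def get_api_relation_countries_alt (query : List (String × List (String × List (String × String)))) : List (String × List (String × List String)) :=
  let rc := (PySem.List.sorted (PySem.Dict.ofList query).items (fun p => p.1)).foldl
    (fun rc p =>
      let inner := (PySem.List.sorted (PySem.Dict.ofList p.2).items (fun q => q.1)).foldl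
        (fun d q => d.insert q.1 (PySem.List.sorted (PySem.Dict.ofList q.2).keys (fun c => c)))
        (PySem.Dict.empty : PySem.Dict String (List String))
      rc.insert p.1 inner)
    (PySem.Dict.empty : PySem.Dict String (PySem.Dict String (List String)))
  rc.items.map (fun p => (p.1, p.2.items))

-- ===== PRECONDITION & SPEC =====
def Spec_get_api_relation_countries (query : List (String × List (String × List (String × String)))) (out : List (String × List (String × List String))) : Prop := out = get_api_relation_countries_alt query
instance (query : List (String × List (String × List (String × String)))) (out : List (String × List (String × List String))) : Decidable (Spec_get_api_relation_countries query out) := by unfold Spec_get_api_relation_countries; infer_instance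

-- ===== CLAIM (what is proved, stated in full; the proofs are below) =====
def Claim_equal_get_api_relation_countries : Prop := ∀ (query : List (String × List (String × List (String × String)))), Dom_get_api_relation_countries query → Spec_get_api_relation_countries query (get_api_relation_countries query)

-- ===== LEMMAS AND PROOFS =====

-- ofList over a list with distinct keys keeps the list as its items
theorem pv_items_ofList {κ ν : Type} [BEq κ] [LawfulBEq κ] (ps : List (κ × ν))
    (h : (ps.map Prod.fst).Nodup) : (PySem.Dict.ofList ps).items = ps := by
  have := PySem.Dict.items_foldl_insert_fresh ps Prod.fst Prod.snd PySem.Dict.empty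
      (fun a _ => by simp) h
  simpa [PySem.Dict.ofList, PySem.Dict.update] using this

-- the sorted items of any ofList dict have pairwise-distinct keys
theorem pv_nodup_sorted_items {ν : Type} (ps : List (String × ν)) :
    ((PySem.List.sorted (PySem.Dict.ofList ps).items (fun p => p.1)).map Prod.fst).Nodup := by
  have h1 : ((PySem.Dict.ofList ps).items.map Prod.fst).Nodup := by
    have := PySem.Dict.nodup_keys_ofList ps
    simpa [PySem.Dict.keys] using this
  have hp : ((PySem.List.sorted (PySem.Dict.ofList ps).items (fun p => p.1)).map Prod.fst).Perm
      ((PySem.Dict.ofList ps).items.map Prod.fst) :=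
    (PySem.List.sorted_perm _ _ _).map Prod.fst
  exact hp.nodup_iff.mpr h1

-- a fold of inserts at keys all different from k leaves the value at k unchanged
theorem pv_getD_foldl_not_mem {κ ν β : Type} [BEq κ] [LawfulBEq κ] (l : List β) (k0 : β → κ)
    (V : β → ν) (k : κ) (d0 : ν) (h : ∀ p ∈ l, k0 p ≠ k) :
    ∀ rc : PySem.Dict κ ν,
      (l.foldl (fun rc p => rc.insert (k0 p) (V p)) rc).getD k d0 = rc.getD k d0 := by
  induction l with
  | nil => intro rc; rfl
  | cons p t ih =>
    intro rc
    rw [List.foldl_cons, ih (fun q hq => h q (List.mem_cons_of_mem _ hq)),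
      PySem.Dict.getD_insert_of_ne _ _ _ (Ne.symm (h p List.mem_cons_self))]

-- a fold of inserts over pairs with distinct keys ends with value V p at key p.1
theorem pv_getD_foldl_mem {κ ν α : Type} [BEq κ] [LawfulBEq κ] (l : List (κ × α))
    (V : κ × α → ν) (hnd : (l.map Prod.fst).Nodup) {k : κ} {v : α} (hm : (k, v) ∈ l) (d0 : ν) :
    ∀ rc : PySem.Dict κ ν,
      (l.foldl (fun rc p => rc.insert p.1 (V p)) rc).getD k d0 = V (k, v) := by
  induction l with
  | nil => exact absurd hm (List.not_mem_nil)
  | cons p t ih =>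
    intro rc
    rw [List.foldl_cons]
    rcases List.mem_cons.mp hm with he | ht
    · subst he
      have hnd' : (¬ k ∈ t.map Prod.fst) ∧ (t.map Prod.fst).Nodup := by
        have := hnd
        simp only [List.map_cons, List.nodup_cons] at this
        exact this
      have hnk : ∀ q ∈ t, q.1 ≠ k := by
        intro q hq hqk
        exact hnd'.1 (hqk ▸ List.mem_map_of_mem hq)
      rw [pv_getD_foldl_not_mem t Prod.fst V k d0 hnk, PySem.Dict.getD_insert_self]
    · have hnd' : (t.map Prod.fst).Nodup := by
        have := hnd
        simp only [List.map_cons, List.nodup_cons] at this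
        exact this.2
      exact ih hnd' ht _

-- a fold of inserts at already-present keys does not change the key list
theorem pv_keys_foldl_overwrite {κ ν α : Type} [BEq κ] [LawfulBEq κ] (l : List (κ × α))
    (V : κ × α → ν) :
    ∀ rc : PySem.Dict κ ν, (∀ p ∈ l, p.1 ∈ rc.keys) →
      (l.foldl (fun rc p => rc.insert p.1 (V p)) rc).keys = rc.keys := by
  induction l with
  | nil => intro rc _; rfl
  | cons p t ih =>
    intro rc h
    rw [List.foldl_cons]
    have hc : rc.contains p.1 = true :=
      (PySem.Dict.contains_iff_mem_keys _ _).mpr (h p (List.mem_cons_self))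
    have hk : (rc.insert p.1 (V p)).keys = rc.keys := PySem.Dict.keys_insert_of_contains _ _ hc
    rw [ih _ (fun q hq => by rw [hk]; exact h q (List.mem_cons_of_mem _ hq)), hk]

-- a fold that re-inserts at the fixed key k, chaining through getD, is one insert of the inner fold
theorem pv_chain {κ κ2 ν2 β : Type} [BEq κ] [LawfulBEq κ] [BEq κ2] (l : List β) (g : β → κ2)
    (f : β → ν2) (k : κ) (dflt : PySem.Dict κ2 ν2) :
    ∀ (rc : PySem.Dict κ (PySem.Dict κ2 ν2)) (d : PySem.Dict κ2 ν2),
      l.foldl (fun rc q => rc.insert k ((rc.getD k dflt).insert (g q) (f q))) (rc.insert k d)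
        = rc.insert k (l.foldl (fun d q => d.insert (g q) (f q)) d) := by
  induction l with
  | nil => intro rc d; rfl
  | cons q t ih =>
    intro rc d
    rw [List.foldl_cons, List.foldl_cons, PySem.Dict.getD_insert_self,
      PySem.Dict.insert_insert_self]
    exact ih rc (d.insert (g q) (f q))

-- folding value overwrites over a dict's own items maps over the items
theorem pv_items_foldl_overwrite {κ ν : Type} [BEq κ] [LawfulBEq κ] (rc : PySem.Dict κ ν)
    (V : κ × ν → ν) (hnd : rc.keys.Nodup) (d0 : ν) :
    (rc.items.foldl (fun rc p => rc.insert p.1 (V p)) rc).items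
      = rc.items.map (fun p => (p.1, V p)) := by
  have hmem : ∀ p ∈ rc.items, p.1 ∈ rc.keys := fun p hp =>
    PySem.Dict.mem_keys_of_mem_items _ hp
  have hkeys := pv_keys_foldl_overwrite rc.items V rc hmem
  have hndi : (rc.items.map Prod.fst).Nodup := by simpa [PySem.Dict.keys] using hnd
  rw [PySem.Dict.items_eq_map_keys _ (hkeys ▸ hnd) d0, hkeys]
  have : rc.keys = rc.items.map Prod.fst := by simp [PySem.Dict.keys]
  rw [this, List.map_map]
  refine List.map_congr_left (fun p hp => ?_)
  simp only [Function.comp]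
  rw [pv_getD_foldl_mem rc.items V hndi (by simpa using hp) d0 rc]

-- the fully-sorted inner region dict both ports produce for one regions_dict rd
def pvInner (rd : List (String × List (String × String))) : List (String × List String) :=
  (PySem.List.sorted (PySem.Dict.ofList rd).items (fun q => q.1)).map
    (fun q => (q.1, PySem.List.sorted (PySem.Dict.ofList q.2).keys (fun c => c)))

-- stage 1 of A for one regions_dict
def pvW (rd : List (String × List (String × String))) : PySem.Dict String (List String) :=
  (PySem.List.sorted (PySem.Dict.ofList rd).items (fun q => q.1)).foldl
    (fun d q => d.insert q.1 (PySem.Dict.ofList q.2).keys) PySem.Dict.empty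

theorem pv_items_W (rd : List (String × List (String × String))) :
    (pvW rd).items = (PySem.List.sorted (PySem.Dict.ofList rd).items (fun q => q.1)).map
      (fun q => (q.1, (PySem.Dict.ofList q.2).keys)) := by
  have := PySem.Dict.items_foldl_insert_fresh
    (PySem.List.sorted (PySem.Dict.ofList rd).items (fun q => q.1)) Prod.fst
    (fun q => (PySem.Dict.ofList q.2).keys) PySem.Dict.empty
    (fun a _ => by simp) (pv_nodup_sorted_items rd)
  simpa [pvW] using this

theorem pv_stage2_value (rd : List (String × List (String × String))) :
    ((PySem.List.sorted (pvW rd).items (fun q => q.1)).foldl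
        (fun d q => d.insert q.1 (PySem.List.sorted q.2 (fun c => c)))
        (PySem.Dict.ofList (PySem.List.sorted (pvW rd).items (fun q => q.1)))).items
      = pvInner rd := by
  have hTnd := pv_nodup_sorted_items rd
  have hU : (pvW rd).items = (PySem.List.sorted (PySem.Dict.ofList rd).items (fun q => q.1)).map
      (fun q => (q.1, (PySem.Dict.ofList q.2).keys)) := pv_items_W rd
  -- the items of pvW are already sorted by key, so the second sort is the identity
  have hpw : ((pvW rd).items).Pairwise (fun a b => a.1 ≤ b.1) := by
    rw [hU]
    exact List.Pairwise.map _ (fun a b h => h)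
      (PySem.List.sorted_pairwise (PySem.Dict.ofList rd).items (fun q => q.1))
  have hsrd : PySem.List.sorted (pvW rd).items (fun q => q.1) = (pvW rd).items :=
    PySem.List.sorted_eq_self_of_pairwise _ _ hpw
  rw [hsrd]
  have hndU : ((pvW rd).items.map Prod.fst).Nodup := by
    rw [hU, List.map_map]
    simpa using hTnd
  have hofU : PySem.Dict.ofList ((pvW rd).items) = PySem.Dict.ofList ((pvW rd).items) := rfl
  have hitems : (PySem.Dict.ofList ((pvW rd).items)).items = (pvW rd).items :=
    pv_items_ofList _ hndU
  have hkeysnd : (PySem.Dict.ofList ((pvW rd).items)).keys.Nodup :=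
    PySem.Dict.nodup_keys_ofList _
  have := pv_items_foldl_overwrite (PySem.Dict.ofList ((pvW rd).items))
    (fun q => PySem.List.sorted q.2 (fun c => c)) hkeysnd []
  rw [hitems] at this
  rw [this, hU, List.map_map, pvInner]
  rfl

theorem pv_portA (query : List (String × List (String × List (String × String)))) :
    get_api_relation_countries query
      = (PySem.List.sorted (PySem.Dict.ofList query).items (fun p => p.1)).map
          (fun p => (p.1, pvInner p.2)) := by
  unfold get_api_relation_countries
  -- stage 1 step = single insert of pvW
  have h1 : (fun (rc : PySem.Dict String (PySem.Dict String (List String)))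
      (p : String × List (String × List (String × String))) =>
      let rc := rc.insert p.1 PySem.Dict.empty
      (PySem.List.sorted (PySem.Dict.ofList p.2).items (fun q => q.1)).foldl
        (fun rc q =>
          let countries := (PySem.Dict.ofList q.2).keys
          rc.insert p.1 ((rc.getD p.1 PySem.Dict.empty).insert q.1 countries)) rc)
      = fun rc p => rc.insert p.1 (pvW p.2) := by
    funext rc p
    exact pv_chain _ Prod.fst (fun q => (PySem.Dict.ofList q.2).keys) p.1 PySem.Dict.empty rc
      PySem.Dict.empty
  -- stage 2 step = single insert of the resorted inner dict
  have h2 : (fun (rc : PySem.Dict String (PySem.Dict String (List String)))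
      (p : String × PySem.Dict String (List String)) =>
      let srd := PySem.List.sorted p.2.items (fun q => q.1)
      let rc := rc.insert p.1 (PySem.Dict.ofList srd)
      srd.foldl
        (fun rc q =>
          rc.insert p.1 ((rc.getD p.1 PySem.Dict.empty).insert q.1
            (PySem.List.sorted q.2 (fun c => c)))) rc)
      = fun rc p => rc.insert p.1
          ((PySem.List.sorted p.2.items (fun q => q.1)).foldl
            (fun d q => d.insert q.1 (PySem.List.sorted q.2 (fun c => c)))
            (PySem.Dict.ofList (PySem.List.sorted p.2.items (fun q => q.1)))) := by
    funext rc p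
    exact pv_chain _ Prod.fst (fun q => PySem.List.sorted q.2 (fun c => c)) p.1 PySem.Dict.empty
      rc (PySem.Dict.ofList (PySem.List.sorted p.2.items (fun q => q.1)))
  simp only [h1, h2]
  -- rc1's items
  have hrc1 : ((PySem.List.sorted (PySem.Dict.ofList query).items (fun p => p.1)).foldl
      (fun rc p => rc.insert p.1 (pvW p.2))
      (PySem.Dict.empty : PySem.Dict String (PySem.Dict String (List String)))).items
      = (PySem.List.sorted (PySem.Dict.ofList query).items (fun p => p.1)).map
          (fun p => (p.1, pvW p.2)) := by
    have := PySem.Dict.items_foldl_insert_fresh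
      (PySem.List.sorted (PySem.Dict.ofList query).items (fun p => p.1)) Prod.fst
      (fun p => pvW p.2) PySem.Dict.empty (fun a _ => by simp) (pv_nodup_sorted_items query)
    simpa using this
  set rc1 := (PySem.List.sorted (PySem.Dict.ofList query).items (fun p => p.1)).foldl
      (fun rc p => rc.insert p.1 (pvW p.2))
      (PySem.Dict.empty : PySem.Dict String (PySem.Dict String (List String))) with hrc1def
  have hndk : rc1.keys.Nodup := by
    have : rc1.keys = rc1.items.map Prod.fst := by simp [PySem.Dict.keys]
    rw [this, hrc1, List.map_map]
    simpa using pv_nodup_sorted_items query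
  have hrc2 := pv_items_foldl_overwrite rc1
    (fun p => (PySem.List.sorted p.2.items (fun q => q.1)).foldl
      (fun d q => d.insert q.1 (PySem.List.sorted q.2 (fun c => c)))
      (PySem.Dict.ofList (PySem.List.sorted p.2.items (fun q => q.1)))) hndk PySem.Dict.empty
  rw [hrc2, hrc1, List.map_map, List.map_map]
  refine List.map_congr_left (fun p _ => ?_)
  simp only [Function.comp]
  exact congrArg (fun z => (p.1, z)) (pv_stage2_value p.2)

theorem pv_portB (query : List (String × List (String × List (String × String)))) :
    get_api_relation_countries_alt query
      = (PySem.List.sorted (PySem.Dict.ofList query).items (fun p => p.1)).map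
          (fun p => (p.1, pvInner p.2)) := by
  unfold get_api_relation_countries_alt
  have hrc : ((PySem.List.sorted (PySem.Dict.ofList query).items (fun p => p.1)).foldl
      (fun rc p => rc.insert p.1
        ((PySem.List.sorted (PySem.Dict.ofList p.2).items (fun q => q.1)).foldl
          (fun d q => d.insert q.1 (PySem.List.sorted (PySem.Dict.ofList q.2).keys (fun c => c)))
          (PySem.Dict.empty : PySem.Dict String (List String))))
      (PySem.Dict.empty : PySem.Dict String (PySem.Dict String (List String)))).items
      = (PySem.List.sorted (PySem.Dict.ofList query).items (fun p => p.1)).map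
          (fun p => (p.1,
            (PySem.List.sorted (PySem.Dict.ofList p.2).items (fun q => q.1)).foldl
              (fun d q => d.insert q.1 (PySem.List.sorted (PySem.Dict.ofList q.2).keys (fun c => c)))
              (PySem.Dict.empty : PySem.Dict String (List String)))) := by
    have := PySem.Dict.items_foldl_insert_fresh
      (PySem.List.sorted (PySem.Dict.ofList query).items (fun p => p.1)) Prod.fst
      (fun p => (PySem.List.sorted (PySem.Dict.ofList p.2).items (fun q => q.1)).foldl
        (fun d q => d.insert q.1 (PySem.List.sorted (PySem.Dict.ofList q.2).keys (fun c => c)))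
        (PySem.Dict.empty : PySem.Dict String (List String)))
      PySem.Dict.empty (fun a _ => by simp) (pv_nodup_sorted_items query)
    simpa using this
  simp only [hrc, List.map_map]
  refine List.map_congr_left (fun p _ => ?_)
  simp only [Function.comp]
  -- the inner dict's items are exactly pvInner p.2
  have := PySem.Dict.items_foldl_insert_fresh
    (PySem.List.sorted (PySem.Dict.ofList p.2).items (fun q => q.1)) Prod.fst
    (fun q => PySem.List.sorted (PySem.Dict.ofList q.2).keys (fun c => c))
    (PySem.Dict.empty : PySem.Dict String (List String))
    (fun a _ => by simp) (pv_nodup_sorted_items p.2)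
  refine congrArg (fun z => (p.1, z)) ?_
  simpa [pvInner] using this

-- ===== VERDICT (by name: the statement is the Claim_ definition above) =====
theorem get_api_relation_countries_spec : Claim_equal_get_api_relation_countries := by
  intro query _
  unfold Spec_get_api_relation_countries
  rw [pv_portA, pv_portB]
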